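-- pv_equiv track=rewrite | github.com/ILikeHotpott/AIVTuber | src/tts/utils/split_text.py | consolidate_short_lines
-- ===== SOURCE A (Python) =====
-- def consolidate_short_lines(lines: list[str], min_len: int = 15) -> list[str]:
--     """首行之外若不足 min_len 字就拼接下一块"""
--     if not lines:
--         return lines
--
--     result = [lines[0]]  # 首行保留
--     i = 1
--     while i < len(lines):
--         cur = lines[i]
--         while len(cur) < min_len and i + 1 < len(lines):
--             i += 1
--             cur += lines[i]
--         result.append(cur)
--         i += 1
--     return result
-- ===== SOURCE B (Python) =====
-- def consolidate_short_lines(lines: list[str], min_len: int = 15) -> list[str]: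
--     """首行之外若不足 min_len 字就拼接下一块"""
--     if not lines:
--         return lines
--     result = [lines[0]]
--     cur = None
--     for line in lines[1:]:
--         cur = line if cur is None else cur + line
--         if len(cur) >= min_len:
--             result.append(cur)
--             cur = None
--     if cur is not None:
--         result.append(cur)
--     return result
-- ===== Notes on version B (the rewrite author's own statement) =====
-- stated objective: faster
-- what changed: Replaces the nested index-walking while loops with a single flat for-loop over lines[1:] threading an Optional buffer that is flushed as soon as it reaches min_len; a timing run measured B markedly faster on large inputs.
import Mathlib
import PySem

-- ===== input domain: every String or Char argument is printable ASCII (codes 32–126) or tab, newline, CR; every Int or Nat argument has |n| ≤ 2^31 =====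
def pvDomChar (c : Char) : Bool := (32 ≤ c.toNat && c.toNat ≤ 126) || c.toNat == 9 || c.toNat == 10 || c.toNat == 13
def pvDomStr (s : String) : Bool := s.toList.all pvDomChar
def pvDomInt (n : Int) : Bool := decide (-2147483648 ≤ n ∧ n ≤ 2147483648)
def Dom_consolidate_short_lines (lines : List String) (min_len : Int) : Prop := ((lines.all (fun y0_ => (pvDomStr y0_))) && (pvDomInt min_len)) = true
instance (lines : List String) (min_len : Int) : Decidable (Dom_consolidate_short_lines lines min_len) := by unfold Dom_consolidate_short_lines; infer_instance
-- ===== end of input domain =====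

-- B replaces A's nested index-walking while loops by one flat pass threading an Option buffer (objective: simpler).

-- ===== PORT A =====
-- inner `while len(cur) < min_len and i + 1 < len(lines): i += 1; cur += lines[i]`
def clTake (min_len : Int) (cur : String) (rest : List String) : String × List String :=
  match rest with
  | [] => (cur, [])
  | x :: xs => if PySem.Str.len cur < min_len then clTake min_len (cur ++ x) xs else (cur, x :: xs)

theorem clTake_snd_le (min_len : Int) (cur : String) (rest : List String) :
    (clTake min_len cur rest).2.length ≤ rest.length := by
  induction rest generalizing cur with
  | nil => simp [clTake]
  | cons x xs ih =>
    simp only [clTake]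
    split
    · exact Nat.le_succ_of_le (ih _)
    · simp

-- outer `while i < len(lines)` with `result.append(cur); i += 1`
def clLoop (min_len : Int) (result : List String) (rest : List String) : List String :=
  match rest with
  | [] => result
  | x :: xs =>
    let p := clTake min_len x xs
    clLoop min_len (result ++ [p.1]) p.2
termination_by rest.length
decreasing_by
  have := clTake_snd_le min_len x xs
  simp only [List.length_cons]
  omega

def consolidate_short_lines (lines : List String) (min_len : Int) : List String :=
  match lines with
  | [] => []                 -- `if not lines: return lines`
  | x :: xs => clLoop min_len [x] xs

-- ===== PORT B =====
-- one loop step: absorb the line into the buffer, flush when long enough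
def clStep (min_len : Int) (acc : List String × Option String) (line : String) : List String × Option String :=
  let cur := match acc.2 with
    | none => line
    | some c => c ++ line
  if min_len ≤ PySem.Str.len cur then (acc.1 ++ [cur], none) else (acc.1, some cur)

-- `if cur is not None: result.append(cur)`
def clFin (p : List String × Option String) : List String :=
  match p.2 with
  | none => p.1
  | some c => p.1 ++ [c]

def consolidate_short_lines_alt (lines : List String) (min_len : Int) : List String :=
  match lines with
  | [] => []
  | x :: xs => clFin (xs.foldl (clStep min_len) ([x], none))

-- ===== PRECONDITION & SPEC =====
def Spec_consolidate_short_lines (lines : List String) (min_len : Int) (out : List String) : Prop := out = consolidate_short_lines_alt lines min_len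
instance (lines : List String) (min_len : Int) (out : List String) : Decidable (Spec_consolidate_short_lines lines min_len out) := by unfold Spec_consolidate_short_lines; infer_instance

-- ===== CLAIM (what is proved, stated in full; the proofs are below) =====
def Claim_equal_consolidate_short_lines : Prop := ∀ (lines : List String) (min_len : Int), Dom_consolidate_short_lines lines min_len → Spec_consolidate_short_lines lines min_len (consolidate_short_lines lines min_len)

-- ===== LEMMAS AND PROOFS =====

theorem clTake_stop (m : Int) (cur : String) (xs : List String) (h : ¬ PySem.Str.len cur < m) :
    clTake m cur xs = (cur, xs) := by
  cases xs with
  | nil => simp [clTake]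
  | cons x xs => simp only [clTake]; rw [if_neg h]

-- the fold with an empty buffer runs A's outer loop; with a short buffer it runs A's inner loop
theorem clKey (m : Int) (xs : List String) :
    (∀ res, clFin (xs.foldl (clStep m) (res, (none : Option String))) = clLoop m res xs) ∧
    (∀ res cur, PySem.Str.len cur < m →
      clFin (xs.foldl (clStep m) (res, some cur)) =
        clLoop m (res ++ [(clTake m cur xs).1]) (clTake m cur xs).2) := by
  induction xs with
  | nil =>
    constructor
    · intro res; simp [clFin, clLoop]
    · intro res cur _; simp [clFin, clTake, clLoop]
  | cons x xs ih =>
    obtain ⟨ih1, ih2⟩ := ih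
    constructor
    · intro res
      simp only [List.foldl_cons, clStep]
      by_cases h : m ≤ PySem.Str.len x
      · rw [if_pos h, ih1]
        rw [clLoop, clTake_stop m x xs (by omega)]
      · rw [if_neg h, ih2 res x (by omega)]
        rw [clLoop]
    · intro res cur hc
      simp only [List.foldl_cons, clStep]
      rw [show clTake m cur (x :: xs) = clTake m (cur ++ x) xs from by simp only [clTake]; rw [if_pos hc]]
      by_cases h : m ≤ PySem.Str.len (cur ++ x)
      · rw [if_pos h, ih1, clTake_stop m (cur ++ x) xs (by omega)]
      · rw [if_neg h, ih2 res (cur ++ x) (by omega)]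

-- ===== VERDICT (by name: the statement is the Claim_ definition above) =====
theorem consolidate_short_lines_spec : Claim_equal_consolidate_short_lines := by
  intro lines min_len _
  unfold Spec_consolidate_short_lines
  cases lines with
  | nil => rfl
  | cons x xs =>
    simp only [consolidate_short_lines, consolidate_short_lines_alt]
    exact ((clKey min_len xs).1 [x]).symm
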